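-- pv_equiv track=rewrite | github.com/segullshairbutt/fyp-cloud-computing | loadbalancer/monitoring_app/utilities.py | get_schema_only
-- ===== SOURCE A (Python) =====
-- def get_schema_only(references):
--     saved_schema = 'default'
--     for reference in references:
--         schema = reference.split("#/components/schemas/")
--         try:
--             saved_schema = schema[1]
--         except IndexError:
--             pass
--
--     return saved_schema
-- ===== SOURCE B (Python) =====
-- def get_schema_only(references):
--     for reference in reversed(list(references)):
--         parts = reference.split("#/components/schemas/")
--         if len(parts) > 1:
--             return parts[1]
--     return 'default'
-- ===== Notes on version B (the rewrite author's own statement) =====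
-- stated objective: faster
-- what changed: B scans the references in reverse and returns at the first string containing the marker (which is A's last overwrite), instead of A's forward loop that splits every reference and overwrites an accumulator via try/except.
import Mathlib
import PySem

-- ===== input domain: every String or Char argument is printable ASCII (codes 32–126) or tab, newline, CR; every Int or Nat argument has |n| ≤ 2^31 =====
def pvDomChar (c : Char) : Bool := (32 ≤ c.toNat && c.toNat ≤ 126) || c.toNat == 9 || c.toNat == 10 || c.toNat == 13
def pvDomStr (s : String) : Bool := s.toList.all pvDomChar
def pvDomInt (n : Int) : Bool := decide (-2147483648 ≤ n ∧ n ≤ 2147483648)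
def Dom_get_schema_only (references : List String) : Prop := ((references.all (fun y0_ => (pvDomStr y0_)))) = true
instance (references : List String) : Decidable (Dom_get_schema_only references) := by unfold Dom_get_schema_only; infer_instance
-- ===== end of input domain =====

-- B scans the references in reverse, returning at the first marker hit; A loops forward overwriting an accumulator.

-- ===== PORT A =====
-- forward loop, accumulator overwritten on each reference whose split has an index 1 (try/except IndexError)
def get_schema_only (references : List String) : String :=
  references.foldl
    (fun saved_schema reference =>
      match PySem.List.pyGet? ((PySem.Str.split? reference "#/components/schemas/").getD []) 1 with
      | some s => s
      | none => saved_schema)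
    "default"

-- ===== PORT B =====
-- reverse scan with early exit at the first reference whose split has more than one part
def get_schema_only_alt_go : List String → String
  | [] => "default"
  | reference :: rest =>
      let parts := (PySem.Str.split? reference "#/components/schemas/").getD []
      if parts.length > 1 then parts.getD 1 "" else get_schema_only_alt_go rest

def get_schema_only_alt (references : List String) : String :=
  get_schema_only_alt_go references.reverse

-- ===== PRECONDITION & SPEC =====
def Spec_get_schema_only (references : List String) (out : String) : Prop := out = get_schema_only_alt references
instance (references : List String) (out : String) : Decidable (Spec_get_schema_only references out) := by unfold Spec_get_schema_only; infer_instance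

-- ===== CLAIM (what is proved, stated in full; the proofs are below) =====
def Claim_equal_get_schema_only : Prop := ∀ (references : List String), Dom_get_schema_only references → Spec_get_schema_only references (get_schema_only references)

-- ===== LEMMAS AND PROOFS =====

theorem pv_key : ∀ (l : List String), get_schema_only l = get_schema_only_alt_go l.reverse := by
  intro l
  induction l using List.reverseRecOn with
  | nil => rfl
  | append_singleton l x ih =>
      simp only [get_schema_only, List.foldl_append, List.foldl_cons, List.foldl_nil,
        List.reverse_append, List.reverse_singleton, List.singleton_append,
        get_schema_only_alt_go] at *
      set parts := (PySem.Str.split? x "#/components/schemas/").getD [] with hp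
      by_cases h : parts.length > 1
      · have hs : PySem.List.pyGet? parts 1 = some (parts.getD 1 "") := by
          rw [show (1 : Int) = ((1 : Nat) : Int) by rfl, PySem.List.pyGet?_natCast]
          simp [List.getD, List.getElem?_eq_getElem h]
        rw [hs]
        simp [h]
      · have hn : PySem.List.pyGet? parts 1 = none := by
          rw [show (1 : Int) = ((1 : Nat) : Int) by rfl, PySem.List.pyGet?_natCast]
          simp only [List.getElem?_eq_none_iff]
          omega
        rw [hn]
        simp [h, ih]

-- ===== VERDICT (by name: the statement is the Claim_ definition above) =====
theorem get_schema_only_spec : Claim_equal_get_schema_only := by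
  intro l _
  unfold Spec_get_schema_only get_schema_only_alt
  exact pv_key l
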